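-- pv_equiv track=rewrite | github.com/seqTWOseq/Reinforcement_learning_concave | gomoku_project/players/heuristic_player.py | _is_open_three
-- ===== SOURCE A (Python) =====
-- def _is_open_four(window: list[str]) -> bool:
--     return (
--         len(window) == 6
--         and window[0] == "E"
--         and window[-1] == "E"
--         and window.count("O") == 0
--         and window.count("S") == 4
--     )
--
-- def _is_open_three(window: list[str]) -> bool:
--     if (
--         len(window) != 6
--         or window[0] != "E"
--         or window[-1] != "E"
--         or window.count("O") > 0
--         or window.count("S") != 3
--     ):
--         return False
--
--     for index, token in enumerate(window):
--         if token != "E":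
--             continue
--         candidate = window.copy()
--         candidate[index] = "S"
--         if _is_open_four(candidate):
--             return True
--     return False
-- ===== SOURCE B (Python) =====
-- def _is_open_three(window: list[str]) -> bool:
--     # Closed-form: the guard plus "some interior cell is empty"; no search, no copies.
--     return (
--         len(window) == 6
--         and window[0] == "E"
--         and window[-1] == "E"
--         and window.count("O") == 0
--         and window.count("S") == 3
--         and "E" in window[1:5]
--     )
-- ===== Notes on version B (the rewrite author's own statement) =====
-- stated objective: simpler
-- what changed: B replaces A's per-position search (copy the window, fill each empty cell, test the filled copy with _is_open_four) by a single closed-form boolean conjunction: the guard plus 'some interior cell is E', which is provably equivalent.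
import Mathlib
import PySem

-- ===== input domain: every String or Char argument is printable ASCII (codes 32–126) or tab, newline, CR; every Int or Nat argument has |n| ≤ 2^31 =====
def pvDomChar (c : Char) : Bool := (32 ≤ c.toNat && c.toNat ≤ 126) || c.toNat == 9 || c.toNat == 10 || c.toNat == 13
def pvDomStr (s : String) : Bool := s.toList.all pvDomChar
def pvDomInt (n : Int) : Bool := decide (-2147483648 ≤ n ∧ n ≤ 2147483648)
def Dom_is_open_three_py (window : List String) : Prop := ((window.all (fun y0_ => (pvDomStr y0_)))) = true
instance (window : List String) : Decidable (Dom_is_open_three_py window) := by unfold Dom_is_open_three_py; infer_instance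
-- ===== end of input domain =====

-- B replaces A's fill-each-empty-cell-and-test search by one closed-form boolean conjunction (simpler; same values everywhere).

-- ===== PORT A =====
-- _is_open_four
def pvOpenFour (w : List String) : Bool :=
  (w.length == 6) && (PySem.List.pyGet? w 0 == some "E") && (PySem.List.pyGet? w (-1) == some "E")
    && (PySem.List.count w "O" == 0) && (PySem.List.count w "S" == 4)

-- the 'for index, token in enumerate(window)' loop; enumerate indices are the
-- nonnegative positions, so 'candidate[index] = "S"' is List.set at i.toNat (exact).
def pvLoop (window : List String) : List (Int × String) → Bool
  | [] => false
  | (i, tok) :: rest =>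
    if tok ≠ "E" then pvLoop window rest
    else
      let candidate := window.set i.toNat "S"
      if pvOpenFour candidate then true else pvLoop window rest

def is_open_three_py (window : List String) : Bool :=
  if window.length ≠ 6 ∨ PySem.List.pyGet? window 0 ≠ some "E" ∨ PySem.List.pyGet? window (-1) ≠ some "E"
      ∨ PySem.List.count window "O" > 0 ∨ PySem.List.count window "S" ≠ 3 then
    false
  else
    pvLoop window (PySem.List.enumerate window 0)

-- ===== PORT B =====
def is_open_three_py_alt (window : List String) : Bool :=
  (window.length == 6) && (PySem.List.pyGet? window 0 == some "E") && (PySem.List.pyGet? window (-1) == some "E")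
    && (PySem.List.count window "O" == 0) && (PySem.List.count window "S" == 3)
    && (PySem.List.slice window (some 1) (some 5)).contains "E"

-- ===== PRECONDITION & SPEC =====
def Spec_is_open_three_py (window : List String) (out : Bool) : Prop := out = is_open_three_py_alt window
instance (window : List String) (out : Bool) : Decidable (Spec_is_open_three_py window out) := by unfold Spec_is_open_three_py; infer_instance

-- ===== CLAIM (what is proved, stated in full; the proofs are below) =====
def Claim_equal_is_open_three_py : Prop := ∀ (window : List String), Dom_is_open_three_py window → Spec_is_open_three_py window (is_open_three_py window)

-- ===== LEMMAS AND PROOFS =====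

-- ===== VERDICT (by name: the statement is the Claim_ definition above) =====
set_option maxHeartbeats 1600000 in
theorem is_open_three_py_spec : Claim_equal_is_open_three_py := by
  intro window _
  unfold Spec_is_open_three_py
  rcases window with _ | ⟨a, _ | ⟨b, _ | ⟨c, _ | ⟨d, _ | ⟨e, _ | ⟨f, _ | ⟨g, rest⟩⟩⟩⟩⟩⟩⟩ <;>
    try simp [is_open_three_py, is_open_three_py_alt]
  by_cases ha : a = "E" <;> by_cases hf : f = "E" <;>
    try (simp [is_open_three_py, ha, hf, List.count_cons, PySem.List.pyGet?, PySem.List.pyIdx?]; done)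
  subst ha hf
  by_cases hb : b = "E" <;> by_cases hc : c = "E" <;> by_cases hd : d = "E" <;> by_cases he : e = "E" <;>
    simp [is_open_three_py, is_open_three_py_alt, pvLoop, pvOpenFour, hb, hc, hd, he,
          PySem.List.enumerate, PySem.List.pyGet?, PySem.List.pyIdx?, PySem.List.count, PySem.List.slice,
          List.count_cons] <;>
    (split_ifs <;> simp_all <;> (intro _ hx; subst hx; simp_all))
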